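-- pv_equiv track=rewrite | github.com/lockej2005/ausflation-scraper | coles/coles_product_processor.py | find_cross_category_duplicates
-- ===== SOURCE A (Python) =====
-- from collections import defaultdict
--
-- def find_cross_category_duplicates(all_category_products):
--     """Find products that appear in multiple categories"""
--     products_by_id = defaultdict(list)
--
--     # Group products by ID
--     for category, products in all_category_products.items():
--         for product in products:
--             product_id = product.get('id')
--             if product_id:
--                 products_by_id[product_id].append((category, product))
--
--     # Find products that appear in multiple categories
--     cross_duplicates = {
--         product_id: products
--         for product_id, products in products_by_id.items()
--         if len(set(category for category, _ in products)) > 1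
--     }
--
--     return cross_duplicates
-- ===== SOURCE B (Python) =====
-- def find_cross_category_duplicates(all_category_products):
--     """Find products that appear in multiple categories"""
--     # Pass 1: record the distinct categories each product id appears in
--     categories_by_id = {}
--     for category, products in all_category_products.items():
--         for product in products:
--             product_id = product.get('id')
--             if product_id:
--                 categories_by_id.setdefault(product_id, set()).add(category)
--
--     qualifying = {pid for pid, cats in categories_by_id.items() if len(cats) > 1}
--
--     # Pass 2: collect (category, product) pairs only for qualifying ids
--     result = {}
--     for category, products in all_category_products.items():
--         for product in products:
--             product_id = product.get('id')
--             if product_id and product_id in qualifying: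
--                 result.setdefault(product_id, []).append((category, product))
--     return result
-- ===== Notes on version B (the rewrite author's own statement) =====
-- stated objective: alternative
-- what changed: A groups every (category, product) pair by id and then filters groups with more than one distinct category; B first detects qualifying ids with a pass that only accumulates the set of distinct categories per id, then a second pass collects pairs solely for qualifying ids.
import Mathlib
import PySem

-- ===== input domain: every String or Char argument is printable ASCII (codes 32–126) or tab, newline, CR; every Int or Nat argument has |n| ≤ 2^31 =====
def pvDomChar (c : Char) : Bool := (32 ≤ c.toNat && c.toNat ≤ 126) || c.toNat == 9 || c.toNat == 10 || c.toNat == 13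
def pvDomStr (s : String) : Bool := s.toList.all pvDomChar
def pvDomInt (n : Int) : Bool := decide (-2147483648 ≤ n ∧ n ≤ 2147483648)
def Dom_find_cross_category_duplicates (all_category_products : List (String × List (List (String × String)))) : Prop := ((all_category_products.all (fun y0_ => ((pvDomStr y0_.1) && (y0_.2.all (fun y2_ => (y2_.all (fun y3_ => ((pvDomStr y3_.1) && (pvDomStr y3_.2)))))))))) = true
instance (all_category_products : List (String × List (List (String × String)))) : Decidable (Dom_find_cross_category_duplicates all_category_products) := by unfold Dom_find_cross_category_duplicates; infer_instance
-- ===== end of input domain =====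

-- B replaces A's group-everything-then-filter with a detection pass (distinct categories per id)
-- plus a separate collection pass restricted to qualifying ids (objective: alternative decomposition).


-- product.get('id')  (product is a dict str -> str; first-match lookup)
def pvPid (product : List (String × String)) : Option String :=
  (PySem.Dict.mk product).get? "id"

-- ===== PORT A =====
def find_cross_category_duplicates (all_category_products : List (String × List (List (String × String)))) : List (String × List (String × (List (String × String)))) :=
  -- products_by_id = defaultdict(list); nested loop appending (category, product) under each truthy id
  let products_by_id : PySem.Dict String (List (String × List (String × String))) :=
    all_category_products.foldl (fun d cp =>
      cp.2.foldl (fun d product =>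
        match pvPid product with
        | some product_id =>
            if product_id = "" then d else d.modify product_id [] (· ++ [(cp.1, product)])
        | none => d) d) PySem.Dict.empty
  -- dict comprehension keeping ids whose set of categories has more than one element
  products_by_id.items.filter (fun kv =>
    PySem.Set.len (PySem.Set.ofList (kv.2.map (·.1))) > 1)

-- ===== PORT B =====
def find_cross_category_duplicates_alt (all_category_products : List (String × List (List (String × String)))) : List (String × List (String × (List (String × String)))) :=
  -- pass 1: distinct categories per product id
  let categories_by_id : PySem.Dict String (PySem.Set String) :=
    all_category_products.foldl (fun d cp =>
      cp.2.foldl (fun d product =>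
        match pvPid product with
        | some product_id =>
            if product_id = "" then d else d.modify product_id PySem.Set.empty (fun s => PySem.Set.add s cp.1)
        | none => d) d) PySem.Dict.empty
  let qualifying : PySem.Set String :=
    PySem.Set.ofList ((categories_by_id.items.filter (fun kv => PySem.Set.len kv.2 > 1)).map (·.1))
  -- pass 2: collect (category, product) only for qualifying ids ('pid and pid in qualifying' short-circuits)
  let result : PySem.Dict String (List (String × List (String × String))) :=
    all_category_products.foldl (fun d cp =>
      cp.2.foldl (fun d product =>
        match pvPid product with
        | some product_id =>
            if product_id = "" then d
            else if PySem.Set.contains qualifying product_id then d.modify product_id [] (· ++ [(cp.1, product)])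
            else d
        | none => d) d) PySem.Dict.empty
  result.items

-- ===== PRECONDITION & SPEC =====
def Spec_find_cross_category_duplicates (all_category_products : List (String × List (List (String × String)))) (out : List (String × List (String × (List (String × String))))) : Prop := out = find_cross_category_duplicates_alt all_category_products
instance (all_category_products : List (String × List (List (String × String)))) (out : List (String × List (String × (List (String × String))))) : Decidable (Spec_find_cross_category_duplicates all_category_products out) := by unfold Spec_find_cross_category_duplicates; infer_instance

-- ===== CLAIM (what is proved, stated in full; the proofs are below) =====
def Claim_equal_find_cross_category_duplicates : Prop := ∀ (all_category_products : List (String × List (List (String × String)))), Dom_find_cross_category_duplicates all_category_products → Spec_find_cross_category_duplicates all_category_products (find_cross_category_duplicates all_category_products)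

-- ===== LEMMAS AND PROOFS =====

-- the flattened stream of (id, (category, product)) entries with a truthy id, in loop order
def pvEntries (all_category_products : List (String × List (List (String × String)))) : List (String × (String × List (String × String))) :=
  all_category_products.flatMap (fun cp =>
    cp.2.filterMap (fun product =>
      match pvPid product with
      | some product_id => if product_id = "" then none else some (product_id, (cp.1, product))
      | none => none))

-- the grouping dict both ports build (A directly; B restricted to qualifying ids)
def pvGrp (e : List (String × (String × List (String × String)))) : PySem.Dict String (List (String × List (String × String))) :=
  e.foldl (fun d x => d.modify x.1 [] (· ++ [x.2])) PySem.Dict.empty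

-- B's pass-1 dict of distinct categories per id
def pvCats (e : List (String × (String × List (String × String)))) : PySem.Dict String (PySem.Set String) :=
  e.foldl (fun d x => d.modify x.1 PySem.Set.empty (fun s => PySem.Set.add s x.2.1)) PySem.Dict.empty

-- the guarded inner loop is a fold over the filtered-mapped entries of one category
theorem pv_inner_eq {σ : Type} (g : σ → (String × (String × List (String × String))) → σ)
    (cat : String) (ps : List (List (String × String))) (d : σ) :
    ps.foldl (fun d product =>
        match pvPid product with
        | some product_id => if product_id = "" then d else g d (product_id, (cat, product))
        | none => d) d
    = (ps.filterMap (fun product =>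
        match pvPid product with
        | some product_id => if product_id = "" then none else some (product_id, (cat, product))
        | none => none)).foldl g d := by
  induction ps generalizing d with
  | nil => rfl
  | cons p t ih =>
      simp only [List.foldl_cons, List.filterMap_cons]
      cases hp : pvPid p with
      | none => simpa using ih d
      | some pid =>
          by_cases h : pid = "" <;> simp [h, ih]

-- both nested loops are folds over pvEntries
theorem pv_fold_entries {σ : Type} (g : σ → (String × (String × List (String × String))) → σ)
    (all : List (String × List (List (String × String)))) (init : σ) :
    all.foldl (fun d cp =>
      cp.2.foldl (fun d product =>
        match pvPid product with
        | some product_id => if product_id = "" then d else g d (product_id, (cp.1, product))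
        | none => d) d) init
    = (pvEntries all).foldl g init := by
  induction all generalizing init with
  | nil => rfl
  | cons cp t ih =>
      simp only [List.foldl_cons, pvEntries, List.flatMap_cons, List.foldl_append]
      rw [pv_inner_eq, ih]
      rfl

-- specializations matching the ports' three loops (definitional instances of pv_fold_entries)
theorem pv_foldA (all : List (String × List (List (String × String)))) :
    all.foldl (fun d cp =>
      cp.2.foldl (fun d product =>
        match pvPid product with
        | some product_id =>
            if product_id = "" then d else d.modify product_id [] (· ++ [(cp.1, product)])
        | none => d) d) PySem.Dict.empty = pvGrp (pvEntries all) :=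
  pv_fold_entries (fun d x => d.modify x.1 [] (· ++ [x.2])) all PySem.Dict.empty

theorem pv_foldB1 (all : List (String × List (List (String × String)))) :
    all.foldl (fun d cp =>
      cp.2.foldl (fun d product =>
        match pvPid product with
        | some product_id =>
            if product_id = "" then d else d.modify product_id PySem.Set.empty (fun s => PySem.Set.add s cp.1)
        | none => d) d) PySem.Dict.empty = pvCats (pvEntries all) :=
  pv_fold_entries (fun d x => d.modify x.1 PySem.Set.empty (fun s => PySem.Set.add s x.2.1)) all PySem.Dict.empty

theorem pv_foldB2 (q : PySem.Set String) (all : List (String × List (List (String × String)))) :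
    all.foldl (fun d cp =>
      cp.2.foldl (fun d product =>
        match pvPid product with
        | some product_id =>
            if product_id = "" then d
            else if PySem.Set.contains q product_id then d.modify product_id [] (· ++ [(cp.1, product)])
            else d
        | none => d) d) PySem.Dict.empty
    = pvGrp ((pvEntries all).filter (fun x => PySem.Set.contains q x.1)) := by
  rw [pvGrp, List.foldl_filter]
  exact pv_fold_entries (fun d x => if PySem.Set.contains q x.1 then d.modify x.1 [] (· ++ [x.2]) else d) all PySem.Dict.empty

-- keys / getD / items of the grouping dict
theorem pv_grp_keys (e : List (String × (String × List (String × String)))) :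
    (pvGrp e).keys = PySem.Set.ofList (e.map (·.1)) := by
  rw [pvGrp, PySem.Dict.keys_foldl_modify_key e (fun x => x.1) [] (fun _ x => (· ++ [x.2])), PySem.Dict.keys_empty, PySem.Set.ofList_eq_foldl]
  rfl

theorem pv_grp_nodup (e : List (String × (String × List (String × String)))) :
    (pvGrp e).keys.Nodup :=
  PySem.Dict.nodup_keys_foldl_modify_key e (fun x => x.1) [] (fun _ x => (· ++ [x.2])) PySem.Dict.empty (by simp [PySem.Dict.keys_empty])

theorem pv_grp_getD (e : List (String × (String × List (String × String)))) (k : String) :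
    (pvGrp e).getD k [] = (e.filter (fun x => x.1 == k)).map (·.2) := by
  rw [pvGrp, PySem.Dict.getD_foldl_modify_append e PySem.Dict.empty k, PySem.Dict.getD_empty]
  rfl

theorem pv_grp_items (e : List (String × (String × List (String × String)))) :
    (pvGrp e).items = (PySem.Set.ofList (e.map (·.1))).map
      (fun k => (k, (e.filter (fun x => x.1 == k)).map (·.2))) := by
  rw [PySem.Dict.items_eq_map_keys (pvGrp e) (pv_grp_nodup e) [], pv_grp_keys]
  exact List.map_congr_left (fun k _ => by rw [pv_grp_getD])

-- keys / getD / items of B's categories dict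
theorem pv_cats_keys (e : List (String × (String × List (String × String)))) :
    (pvCats e).keys = PySem.Set.ofList (e.map (·.1)) := by
  rw [pvCats, PySem.Dict.keys_foldl_modify_key e (fun x => x.1) PySem.Set.empty (fun _ x => (fun s => PySem.Set.add s x.2.1)), PySem.Dict.keys_empty, PySem.Set.ofList_eq_foldl]
  rfl

theorem pv_cats_nodup (e : List (String × (String × List (String × String)))) :
    (pvCats e).keys.Nodup :=
  PySem.Dict.nodup_keys_foldl_modify_key e (fun x => x.1) PySem.Set.empty (fun _ x => (fun s => PySem.Set.add s x.2.1)) PySem.Dict.empty (by simp [PySem.Dict.keys_empty])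

theorem pv_cats_getD_aux (l : List (String × (String × List (String × String))))
    (d : PySem.Dict String (PySem.Set String)) (k : String) :
    (l.foldl (fun d x => d.modify x.1 PySem.Set.empty (fun s => PySem.Set.add s x.2.1)) d).getD k PySem.Set.empty
    = PySem.Set.update (d.getD k PySem.Set.empty) ((l.filter (fun x => x.1 == k)).map (·.2.1)) := by
  induction l generalizing d with
  | nil => rfl
  | cons x t ih =>
      simp only [List.foldl_cons, List.filter_cons]
      rw [ih, PySem.Dict.getD_modify]
      by_cases h : x.1 = k
      · have hb : (x.1 == k) = true := by simp [h]
        rw [if_pos h.symm, hb]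
        simp [PySem.Set.update, h]
      · have hb : (x.1 == k) = false := by simp [h]
        rw [if_neg (fun hk => h hk.symm), hb]
        simp

theorem pv_cats_getD (e : List (String × (String × List (String × String)))) (k : String) :
    (pvCats e).getD k PySem.Set.empty = PySem.Set.ofList ((e.filter (fun x => x.1 == k)).map (·.2.1)) := by
  rw [pvCats, pv_cats_getD_aux e PySem.Dict.empty k, PySem.Dict.getD_empty, PySem.Set.ofList_eq_foldl]
  rfl

theorem pv_cats_items (e : List (String × (String × List (String × String)))) :
    (pvCats e).items = (PySem.Set.ofList (e.map (·.1))).map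
      (fun k => (k, PySem.Set.ofList ((e.filter (fun x => x.1 == k)).map (·.2.1)))) := by
  rw [PySem.Dict.items_eq_map_keys (pvCats e) (pv_cats_nodup e) PySem.Set.empty, pv_cats_keys]
  exact List.map_congr_left (fun k _ => by rw [pv_cats_getD])

-- Set.ofList commutes with filter
theorem pv_ofList_filter (q : String → Bool) (l : List String) :
    PySem.Set.ofList (l.filter q) = (PySem.Set.ofList l).filter q := by
  have key : ∀ (l : List String) (s : PySem.Set String),
      (l.filter q).foldl PySem.Set.add (s.filter q) = (l.foldl PySem.Set.add s).filter q := by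
    intro l
    induction l with
    | nil => intro s; rfl
    | cons x t ih =>
        intro s
        by_cases hq : q x
        · have hstep : List.filter q (PySem.Set.add s x) = PySem.Set.add (List.filter q s) x := by
            by_cases hm : x ∈ s
            · have hm' : x ∈ List.filter q s := List.mem_filter.mpr ⟨hm, hq⟩
              simp [PySem.Set.add, List.contains_eq_mem, hm, hm']
            · have hm' : ¬ x ∈ List.filter q s := fun hc => hm (List.mem_filter.mp hc).1
              simp [PySem.Set.add, List.contains_eq_mem, hm, hm', List.filter_append, hq]
          rw [List.filter_cons_of_pos hq, List.foldl_cons, List.foldl_cons, ← hstep, ih]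
        · have hstep : List.filter q (PySem.Set.add s x) = List.filter q s := by
            by_cases hm : x ∈ s
            · simp [PySem.Set.add, List.contains_eq_mem, hm]
            · simp [PySem.Set.add, List.contains_eq_mem, hm, List.filter_append, hq]
          rw [List.filter_cons_of_neg (by simpa using hq), List.foldl_cons, ← hstep, ih]
  have h := key l []
  rw [PySem.Set.ofList_eq_foldl, PySem.Set.ofList_eq_foldl, ← h]
  rfl

-- map fst commutes past a fst-only filter
theorem pv_map_fst_filter {α : Type} (q : String → Bool) (l : List (String × α)) :
    (l.filter (fun x => q x.1)).map (·.1) = (l.map (·.1)).filter q := by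
  induction l with
  | nil => rfl
  | cons x t ih =>
      by_cases h : q x.1 <;> simp [h, ih]

-- the heart: group-then-filter equals detect-then-collect, over the flattened entry stream
theorem pv_main (e : List (String × (String × List (String × String)))) :
    (pvGrp e).items.filter (fun kv => PySem.Set.len (PySem.Set.ofList (kv.2.map (·.1))) > 1)
    = (pvGrp (e.filter (fun x => PySem.Set.contains
        (PySem.Set.ofList (((pvCats e).items.filter (fun kv => PySem.Set.len kv.2 > 1)).map (·.1))) x.1))).items := by
  have hqual : PySem.Set.ofList (((pvCats e).items.filter (fun kv => PySem.Set.len kv.2 > 1)).map (·.1))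
      = PySem.Set.ofList ((PySem.Set.ofList (e.map (·.1))).filter
          (fun k => decide (PySem.Set.len (PySem.Set.ofList ((e.filter (fun x => x.1 == k)).map (·.2.1))) > 1))) := by
    rw [pv_cats_items, List.filter_map, List.map_map]
    simp [Function.comp_def]
  rw [hqual]
  rw [pv_grp_items, List.filter_map]
  rw [pv_grp_items, pv_map_fst_filter (fun k => PySem.Set.contains (PySem.Set.ofList ((PySem.Set.ofList (e.map (·.1))).filter
          (fun k => decide (PySem.Set.len (PySem.Set.ofList ((e.filter (fun x => x.1 == k)).map (·.2.1))) > 1)))) k) e,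
      pv_ofList_filter (fun k => PySem.Set.contains (PySem.Set.ofList ((PySem.Set.ofList (e.map (·.1))).filter
          (fun k => decide (PySem.Set.len (PySem.Set.ofList ((e.filter (fun x => x.1 == k)).map (·.2.1))) > 1)))) k) (e.map (·.1))]
  simp only [Function.comp_def, List.map_map]
  have hmem : ∀ k : String, PySem.Set.contains (PySem.Set.ofList ((PySem.Set.ofList (e.map (·.1))).filter
      (fun k => decide (PySem.Set.len (PySem.Set.ofList ((e.filter (fun x => x.1 == k)).map (·.2.1))) > 1)))) k = true
      ↔ k ∈ PySem.Set.ofList (e.map (·.1)) ∧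
        decide (PySem.Set.len (PySem.Set.ofList ((e.filter (fun x => x.1 == k)).map (·.2.1))) > 1) = true := by
    intro k
    rw [PySem.Set.contains_iff, PySem.Set.mem_ofList, List.mem_filter]
  rw [List.filter_congr (fun k hk => ((Bool.eq_iff_iff).mpr
      (Iff.trans (hmem k) ⟨fun h => h.2, fun h => ⟨hk, h⟩⟩)))]
  refine List.map_congr_left (fun k hk => ?_)
  obtain ⟨hkS, hck⟩ := List.mem_filter.mp hk
  have hqbk := (hmem k).mpr ⟨hkS, hck⟩
  refine congrArg (fun l => (k, l)) ?_
  rw [List.filter_filter]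
  refine congrArg _ (List.filter_congr (fun x _ => ?_))
  by_cases hx : x.1 = k
  · rw [hx]; simp only [beq_self_eq_true, Bool.true_and]; exact hqbk.symm
  · simp [hx]

-- ===== VERDICT (by name: the statement is the Claim_ definition above) =====
theorem find_cross_category_duplicates_spec : Claim_equal_find_cross_category_duplicates := by
  intro all _
  unfold Spec_find_cross_category_duplicates
  simp only [find_cross_category_duplicates, find_cross_category_duplicates_alt]
  rw [pv_foldA, pv_foldB1, pv_foldB2]
  exact pv_main (pvEntries all)
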